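-- pv_equiv track=rewrite | github.com/nolcut/FaaSr-Backend | FaaSr_py/s3_api/registry.py | _glob_prefix
-- ===== SOURCE A (Python) =====
-- def _glob_prefix(pattern: str) -> str:
--     """Extract the S3 prefix (literal leading segments) from a glob pattern."""
--     segments = pattern.lstrip("/").split("/")
--     literal = []
--     for seg in segments:
--         if any(c in seg for c in ("*", "?", "[")):
--             break
--         literal.append(seg)
--     prefix = "/".join(literal)
--     return (prefix + "/") if prefix else ""
-- ===== SOURCE B (Python) =====
-- def _glob_prefix(pattern: str) -> str:
--     """Extract the S3 prefix (literal leading segments) from a glob pattern."""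
--     s = pattern.lstrip("/")
--     out = []   # committed prefix chars (always ends with '/' when nonempty)
--     cur = []   # chars of the current, not yet slash-terminated segment
--     for c in s:
--         if c in "*?[":
--             return "".join(out)
--         cur.append(c)
--         if c == "/":
--             out += cur
--             cur = []
--     out += cur
--     return "".join(out) + "/" if out else ""
-- ===== Notes on version B (the rewrite author's own statement) =====
-- stated objective: alternative
-- what changed: Replaces A's split-into-segments list, break-loop over segments and slash-join by a single left-to-right character scan that commits segment characters as it passes each slash and returns early at the first wildcard character.
import Mathlib
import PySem

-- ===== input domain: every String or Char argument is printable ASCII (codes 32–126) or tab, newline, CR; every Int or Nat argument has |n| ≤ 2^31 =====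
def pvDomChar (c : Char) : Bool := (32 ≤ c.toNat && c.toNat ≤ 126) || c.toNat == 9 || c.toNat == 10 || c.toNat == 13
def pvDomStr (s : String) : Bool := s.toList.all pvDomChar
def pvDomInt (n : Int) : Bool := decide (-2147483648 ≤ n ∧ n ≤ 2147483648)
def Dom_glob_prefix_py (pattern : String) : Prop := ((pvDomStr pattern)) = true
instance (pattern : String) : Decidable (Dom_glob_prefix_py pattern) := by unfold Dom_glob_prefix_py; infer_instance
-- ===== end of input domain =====

-- B replaces A's split-into-segments / break-loop / join pipeline by one left-to-right
-- character scan with an early return at the first wildcard (objective: alternative).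

-- Shared exact port of Python's `pattern.lstrip("/")` (the prelude has no lstrip-with-chars;
-- for the single strip character '/' it is exactly dropWhile (· == '/') on the code points).
def pyLstripSlash (cs : List Char) : List Char := cs.dropWhile (· == '/')

-- ===== PORT A =====
-- port of `any(c in seg for c in ("*", "?", "["))`
def hasWildA (seg : List Char) : Bool :=
  PySem.Chars.isIn ['*'] seg || PySem.Chars.isIn ['?'] seg || PySem.Chars.isIn ['['] seg

-- the `for seg in segments: … break … append` loop building `literal`
def aLoop : List (List Char) → List (List Char)
  | [] => []
  | seg :: rest => if hasWildA seg then [] else seg :: aLoop rest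

def glob_prefix_py (pattern : String) : String :=
  let segments := PySem.Chars.splitOn (pyLstripSlash pattern.toList) ['/']
  let literal := aLoop segments
  let pre := PySem.Chars.join ['/'] literal
  if pre = [] then "" else String.ofList (pre ++ ['/'])

-- ===== PORT B =====
-- the `for c in s` loop of Source B: `out` = committed prefix chars, `cur` = current segment chars
def bGo : List Char → List Char → List Char → List Char
  | [], out, cur =>
      -- out += cur; return "".join(out) + "/" if out else ""
      let o := out ++ cur
      if o = [] then [] else o ++ ['/']
  | c :: rest, out, cur =>
      if ['*', '?', '['].contains c then out            -- `if c in "*?[": return "".join(out)`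
      else
        let cur' := cur ++ [c]                          -- cur.append(c)
        if c = '/' then bGo rest (out ++ cur') []       -- out += cur; cur = []
        else bGo rest out cur'

def glob_prefix_py_alt (pattern : String) : String :=
  String.ofList (bGo (pyLstripSlash pattern.toList) [] [])

-- ===== PRECONDITION & SPEC =====
def Spec_glob_prefix_py (pattern : String) (out : String) : Prop := out = glob_prefix_py_alt pattern
instance (pattern : String) (out : String) : Decidable (Spec_glob_prefix_py pattern out) := by unfold Spec_glob_prefix_py; infer_instance

-- ===== CLAIM (what is proved, stated in full; the proofs are below) =====
def Claim_equal_glob_prefix_py : Prop := ∀ (pattern : String), Dom_glob_prefix_py pattern → Spec_glob_prefix_py pattern (glob_prefix_py pattern)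

-- ===== LEMMAS AND PROOFS =====

-- c is one of the three glob wildcard characters
def wild (c : Char) : Bool := c = '*' || c = '?' || c = '['

-- prepend chars to the first piece of a split
def consHead (x : List Char) : List (List Char) → List (List Char)
  | [] => [x]
  | p :: ps => (x ++ p) :: ps

-- reference shape of s.split("/")
def splitSlash : List Char → List (List Char)
  | [] => [[]]
  | c :: rest => if c = '/' then [] :: splitSlash rest else consHead [c] (splitSlash rest)

-- reference shape of "/".join
def interSlash : List (List Char) → List Char
  | [] => []
  | [x] => x
  | x :: y :: r => x ++ '/' :: interSlash (y :: r)

def takeSegs : List (List Char) → List (List Char)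
  | [] => []
  | seg :: rest => if seg.any wild then [] else seg :: takeSegs rest

-- the common final step: join the literal segments and append '/' when nonempty
def finishSegs (l : List (List Char)) : List Char :=
  if interSlash l = [] then [] else interSlash l ++ ['/']

-- what B's `out` accumulator holds: each committed segment followed by a slash
def flatD (done : List (List Char)) : List Char := (done.map (· ++ ['/'])).flatten

lemma interSlash_nil : interSlash [] = [] := rfl

lemma interSlash_singleton (x : List Char) : interSlash [x] = x := rfl

lemma join_slash_eq (l : List (List Char)) : PySem.Chars.join ['/'] l = interSlash l := by
  rw [PySem.Chars.join]
  induction l with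
  | nil => rfl
  | cons x r ih =>
    cases r with
    | nil => simp [List.intercalate, interSlash]
    | cons y s =>
      simp only [List.intercalate, List.intersperse, List.flatten_cons] at *
      simp [interSlash, ← ih]

lemma splitSlash_ne_nil (cs : List Char) : splitSlash cs ≠ [] := by
  cases cs with
  | nil => simp [splitSlash]
  | cons c rest =>
    simp only [splitSlash]
    split
    · simp
    · cases h : splitSlash rest <;> simp [consHead]

lemma consHead_nil_of_ne (l : List (List Char)) (h : l ≠ []) : consHead [] l = l := by
  cases l with
  | nil => exact absurd rfl h
  | cons p ps => simp [consHead]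

lemma consHead_consHead (a b : List Char) (l : List (List Char)) :
    consHead a (consHead b l) = consHead (a ++ b) l := by
  cases l <;> simp [consHead]

lemma splitOn_go_eq (fuel : Nat) :
    ∀ (l cur : List Char) (acc : List (List Char)), l.length < fuel →
      PySem.Chars.splitOn.go ['/'] fuel l cur acc = acc.reverse ++ consHead cur.reverse (splitSlash l) := by
  induction fuel with
  | zero => intro l cur acc h; omega
  | succ n ih =>
    intro l cur acc h
    cases l with
    | nil =>
      rw [PySem.Chars.splitOn.go]
      all_goals first
        | omega
        | simp [splitSlash, consHead]
    | cons c rest =>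
      by_cases hc : c = '/'
      · subst hc
        rw [PySem.Chars.splitOn.go, if_pos (by simp [List.isPrefixOf])]
        simp only [List.length_cons, List.length_nil, Nat.zero_add, List.drop_succ_cons,
          List.drop_zero]
        rw [ih rest [] (cur.reverse :: acc) (by simp at h; omega)]
        simp only [List.reverse_nil]
        rw [consHead_nil_of_ne _ (splitSlash_ne_nil rest)]
        simp [splitSlash, consHead]
      · rw [PySem.Chars.splitOn.go]
        rw [if_neg (by simp [List.isPrefixOf, Ne.symm hc])]
        rw [ih rest (c :: cur) acc (by simp at h; omega)]
        simp [splitSlash, hc, consHead_consHead]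

lemma splitOn_slash (cs : List Char) : PySem.Chars.splitOn cs ['/'] = splitSlash cs := by
  rw [PySem.Chars.splitOn, splitOn_go_eq (cs.length + 1) cs [] [] (by omega)]
  simp [consHead_nil_of_ne _ (splitSlash_ne_nil cs)]

lemma singleton_infix_iff (a : Char) (l : List Char) : [a] <:+: l ↔ a ∈ l := by
  constructor
  · intro h; exact h.subset (by simp)
  · intro h
    obtain ⟨s, t, rfl⟩ := List.append_of_mem h
    exact ⟨s, t, by simp⟩

lemma hasWildA_eq (seg : List Char) : hasWildA seg = seg.any wild := by
  rw [Bool.eq_iff_iff]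
  simp only [hasWildA, wild, Bool.or_eq_true, PySem.Chars.isIn_iff_infix, singleton_infix_iff,
    List.any_eq_true, decide_eq_true_eq]
  constructor
  · rintro ((h | h) | h)
    · exact ⟨_, h, Or.inl (Or.inl rfl)⟩
    · exact ⟨_, h, Or.inl (Or.inr rfl)⟩
    · exact ⟨_, h, Or.inr rfl⟩
  · rintro ⟨c, hc, (rfl | rfl) | rfl⟩
    · exact Or.inl (Or.inl hc)
    · exact Or.inl (Or.inr hc)
    · exact Or.inr hc

lemma aLoop_eq (l : List (List Char)) : aLoop l = takeSegs l := by
  induction l with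
  | nil => rfl
  | cons seg rest ih => simp [aLoop, takeSegs, hasWildA_eq, ih]

lemma contains_wild (c : Char) : (['*', '?', '['].contains c) = wild c := by
  rw [Bool.eq_iff_iff]
  simp [wild]
  tauto

lemma interSlash_snoc (done : List (List Char)) (cur : List Char) (h : done ≠ []) :
    interSlash (done ++ [cur]) = interSlash done ++ '/' :: cur := by
  induction done with
  | nil => exact absurd rfl h
  | cons d ds ih =>
    cases ds with
    | nil => simp [interSlash]
    | cons e es =>
      have := ih (by simp)
      simp only [List.cons_append, interSlash] at *
      simp [this]

lemma flatD_eq (done : List (List Char)) :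
    flatD done = if done = [] then [] else interSlash done ++ ['/'] := by
  induction done with
  | nil => rfl
  | cons d ds ih =>
    cases ds with
    | nil => simp [flatD, interSlash_singleton]
    | cons e es =>
      simp only [flatD, List.map_cons, List.flatten_cons] at *
      simp only [interSlash]
      simp [ih]

lemma bGo_spec : ∀ (cs : List Char) (done : List (List Char)) (cur : List Char),
    cur.any wild = false → '/' ∉ cur →
    (interSlash done = [] → done = []) →
    ((done = [] ∧ cur = []) → cs.head? ≠ some '/') →
    bGo cs (flatD done) cur = finishSegs (done ++ takeSegs (consHead cur (splitSlash cs))) := by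
  intro cs
  induction cs with
  | nil =>
    intro done cur hw _ _ _
    simp only [bGo, splitSlash, consHead, takeSegs, hw, Bool.false_eq_true, if_false,
      List.append_nil]
    by_cases hd : done = []
    · subst hd; simp [flatD, finishSegs, interSlash_singleton]
    · rw [flatD_eq, if_neg hd, finishSegs, interSlash_snoc _ _ hd,
        if_neg (by simp), if_neg (by simp)]
      simp
  | cons c rest ih =>
    intro done cur hw hs h1 h2
    by_cases hwc : wild c = true
    · -- early return with the committed prefix
      have hcslash : c ≠ '/' := by
        revert hwc; simp only [wild, Bool.or_eq_true, decide_eq_true_eq]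
        rintro ((rfl | rfl) | rfl) <;> decide
      simp only [bGo, contains_wild, hwc, if_true]
      obtain ⟨p, ps, hsp⟩ : ∃ p ps, splitSlash rest = p :: ps := by
        cases h : splitSlash rest with
        | nil => exact absurd h (splitSlash_ne_nil rest)
        | cons p ps => exact ⟨p, ps, rfl⟩
      have htk : takeSegs (consHead cur (splitSlash (c :: rest))) = [] := by
        simp only [splitSlash, if_neg hcslash, hsp, consHead, takeSegs]
        rw [if_pos (by simp [hwc])]
      rw [htk, List.append_nil, flatD_eq]
      by_cases hd : done = []
      · subst hd; simp [finishSegs, interSlash_nil]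
      · have hne : interSlash done ≠ [] := fun hc => hd (h1 hc)
        rw [if_neg hd, finishSegs, if_neg hne]
    · have hwc' : wild c = false := by simpa using hwc
      simp only [bGo, contains_wild, hwc', Bool.false_eq_true, if_false]
      by_cases hcs : c = '/'
      · subst hcs
        rw [if_pos rfl]
        have hflat : flatD done ++ (cur ++ ['/']) = flatD (done ++ [cur]) := by simp [flatD]
        rw [hflat, ih (done ++ [cur]) [] (by simp) (by simp)
          (by
            intro hnil
            cases hd : done with
            | nil =>
              have hcur : cur ≠ [] := fun hc => h2 ⟨hd, hc⟩ (by simp)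
              rw [hd] at hnil
              rw [List.nil_append, interSlash_singleton] at hnil
              exact absurd hnil hcur
            | cons d ds =>
              rw [hd] at hnil
              rw [interSlash_snoc _ _ (by simp)] at hnil
              simp at hnil)
          (by simp)]
        rw [consHead_nil_of_ne _ (splitSlash_ne_nil rest)]
        have hss : splitSlash ('/' :: rest) = [] :: splitSlash rest := by simp [splitSlash]
        have hch : consHead cur ([] :: splitSlash rest) = cur :: splitSlash rest := by
          simp [consHead]
        have htk2 : takeSegs (cur :: splitSlash rest) = cur :: takeSegs (splitSlash rest) := by
          simp [takeSegs, hw]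
        rw [hss, hch, htk2]
        simp [List.append_assoc]
      · rw [ih done (cur ++ [c]) (by simp [hw, hwc']) (by simp [hs, Ne.symm hcs]) h1 (by simp)]
        simp only [splitSlash, if_neg hcs, consHead_consHead]

-- the first character surviving lstrip("/") is never '/'
lemma head_dropWhile_slash (cs : List Char) : (pyLstripSlash cs).head? ≠ some '/' := by
  induction cs with
  | nil => simp [pyLstripSlash]
  | cons c rest ih =>
    by_cases h : c = '/'
    · simpa [pyLstripSlash, h] using ih
    · simp [pyLstripSlash, h]

-- ===== VERDICT (by name: the statement is the Claim_ definition above) =====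
theorem glob_prefix_py_spec : Claim_equal_glob_prefix_py := by
  intro pattern _
  have hb := bGo_spec (pyLstripSlash pattern.toList) [] [] (by simp) (by simp)
    (by intro _; rfl) (fun _ => head_dropWhile_slash pattern.toList)
  rw [show flatD [] = [] from rfl, consHead_nil_of_ne _ (splitSlash_ne_nil _),
    List.nil_append, finishSegs] at hb
  unfold Spec_glob_prefix_py glob_prefix_py glob_prefix_py_alt
  dsimp only
  rw [hb, splitOn_slash, aLoop_eq, join_slash_eq]
  by_cases hpre : interSlash (takeSegs (splitSlash (pyLstripSlash pattern.toList))) = []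
  · rw [if_pos hpre, if_pos hpre]
  · rw [if_neg hpre, if_neg hpre]
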